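-- pv_equiv track=rewrite | github.com/nate-d-olson/hap.py | src/hap_py/haplo/python_preprocess.py | normalize_variant
-- ===== SOURCE A (Python) =====
-- from typing import List, Optional, Tuple, Union
--
-- def normalize_variant(
--     chrom: str, pos: int, ref: str, alt: str
-- ) -> Tuple[int, str, str]:
--     """
--     Normalize a variant by trimming common prefixes/suffixes.
--
--     Args:
--         chrom: Chromosome name
--         pos: 1-based position
--         ref: Reference allele
--         alt: Alternative allele
--
--     Returns:
--         Tuple of (normalized_pos, normalized_ref, normalized_alt)
--     """
--     # Skip if one of the alleles is symbolic
--     if alt.startswith("<") or ref.startswith("<"):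
--         return pos, ref, alt
--
--     # Skip if one of the alleles is empty
--     if not ref or not alt:
--         return pos, ref, alt
--
--     # Trim common suffix
--     while len(ref) > 1 and len(alt) > 1 and ref[-1] == alt[-1]:
--         ref = ref[:-1]
--         alt = alt[:-1]
--
--     # Trim common prefix and adjust position
--     new_pos = pos
--     while len(ref) > 1 and len(alt) > 1 and ref[0] == alt[0]:
--         ref = ref[1:]
--         alt = alt[1:]
--         new_pos += 1
--
--     # Make sure we don't end up with empty alleles
--     if not ref or not alt:
--         ref = "."
--         alt = "."
--
--     return new_pos, ref, alt
-- ===== SOURCE B (Python) =====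
-- def normalize_variant(chrom, pos, ref, alt):
--     # Symbolic or empty alleles are returned unchanged
--     if alt.startswith("<") or ref.startswith("<") or not ref or not alt:
--         return pos, ref, alt
--     nr, na = len(ref), len(alt)
--     # Count matching trailing characters (keeping at least one char in each allele)
--     k = 0
--     while k < min(nr, na) - 1 and ref[nr - 1 - k] == alt[na - 1 - k]:
--         k += 1
--     # Count matching leading characters of the suffix-trimmed alleles
--     p = 0
--     lim = min(nr, na) - k - 1
--     while p < lim and ref[p] == alt[p]:
--         p += 1
--     return pos + p, ref[p:nr - k], alt[p:na - k]
-- ===== Notes on version B (the rewrite author's own statement) =====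
-- stated objective: faster
-- what changed: Instead of repeatedly slicing one character off both alleles per loop iteration, B counts the number of matching trailing and leading characters with two index-only passes and then takes a single slice of each allele.
import Mathlib
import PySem

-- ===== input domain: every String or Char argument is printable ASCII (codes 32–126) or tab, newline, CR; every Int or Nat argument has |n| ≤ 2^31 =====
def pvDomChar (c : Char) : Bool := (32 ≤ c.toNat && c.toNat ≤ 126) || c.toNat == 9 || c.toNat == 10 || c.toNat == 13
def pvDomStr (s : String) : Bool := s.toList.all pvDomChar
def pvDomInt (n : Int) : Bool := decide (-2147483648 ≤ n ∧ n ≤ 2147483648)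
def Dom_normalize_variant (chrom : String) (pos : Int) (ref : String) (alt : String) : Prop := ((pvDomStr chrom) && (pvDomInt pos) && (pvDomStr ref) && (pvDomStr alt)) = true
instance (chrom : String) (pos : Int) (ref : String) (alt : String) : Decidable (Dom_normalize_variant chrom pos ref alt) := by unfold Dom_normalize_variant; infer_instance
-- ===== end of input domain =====

-- B replaces A's char-by-char slicing loops by counting the matching suffix/prefix
-- lengths with index loops and doing a single slice of each allele (objective: faster).

-- ===== PORT A =====
-- strings are handled as their character lists (exact; PySem string ops are list-based)
-- while len(ref) > 1 and len(alt) > 1 and ref[-1] == alt[-1]: ref = ref[:-1]; alt = alt[:-1]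
def trimSufA (r a : List Char) : List Char × List Char :=
  if 1 < r.length ∧ 1 < a.length ∧ PySem.List.pyGet? r (-1) = PySem.List.pyGet? a (-1) then
    trimSufA (PySem.List.slice r none (some (-1))) (PySem.List.slice a none (some (-1)))
  else (r, a)
termination_by r.length
decreasing_by simp only [PySem.List.slice_to_neg_one, List.length_dropLast]; omega

-- while len(ref) > 1 and len(alt) > 1 and ref[0] == alt[0]: ref = ref[1:]; alt = alt[1:]; new_pos += 1
def trimPreA (pos : Int) (r a : List Char) : Int × List Char × List Char :=
  if 1 < r.length ∧ 1 < a.length ∧ PySem.List.pyGet? r 0 = PySem.List.pyGet? a 0 then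
    trimPreA (pos + 1) (PySem.List.slice r (some 1) none) (PySem.List.slice a (some 1) none)
  else (pos, r, a)
termination_by r.length
decreasing_by simp only [PySem.List.slice_from_one, List.length_tail]; omega

def normalize_variant (chrom : String) (pos : Int) (ref : String) (alt : String) : Int × String × String :=
  if PySem.Str.startswith alt "<" || PySem.Str.startswith ref "<" then (pos, ref, alt)
  else if ref.toList.isEmpty || alt.toList.isEmpty then (pos, ref, alt)
  else
    let ra := trimSufA ref.toList alt.toList
    let pra := trimPreA pos ra.1 ra.2
    if pra.2.1.isEmpty || pra.2.2.isEmpty then (pra.1, ".", ".")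
    else (pra.1, String.ofList pra.2.1, String.ofList pra.2.2)

-- ===== PORT B =====
-- the hand-written 'k = 0; while k < lim and cond(k): k += 1' counting loops of Source B
def bCount (cond : Nat → Bool) (lim k : Nat) : Nat :=
  if k < lim ∧ cond k = true then bCount cond lim (k + 1) else k
termination_by lim - k
decreasing_by omega

def normalize_variant_alt (chrom : String) (pos : Int) (ref : String) (alt : String) : Int × String × String :=
  if PySem.Str.startswith alt "<" || PySem.Str.startswith ref "<" || ref.toList.isEmpty || alt.toList.isEmpty then
    (pos, ref, alt)
  else
    let r := ref.toList
    let a := alt.toList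
    let k := bCount (fun k => decide (PySem.List.pyGet? r ((r.length : Int) - 1 - (k : Int)) = PySem.List.pyGet? a ((a.length : Int) - 1 - (k : Int)))) (min r.length a.length - 1) 0
    let p := bCount (fun p => decide (PySem.List.pyGet? r (p : Int) = PySem.List.pyGet? a (p : Int))) (min r.length a.length - k - 1) 0
    (pos + (p : Int), String.ofList (PySem.List.slice r (some (p : Int)) (some ((r.length - k : Nat) : Int))),
              String.ofList (PySem.List.slice a (some (p : Int)) (some ((a.length - k : Nat) : Int))))

-- ===== PRECONDITION & SPEC =====
def Spec_normalize_variant (chrom : String) (pos : Int) (ref : String) (alt : String) (out : Int × String × String) : Prop := out = normalize_variant_alt chrom pos ref alt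
instance (chrom : String) (pos : Int) (ref : String) (alt : String) (out : Int × String × String) : Decidable (Spec_normalize_variant chrom pos ref alt out) := by unfold Spec_normalize_variant; infer_instance

-- ===== CLAIM (what is proved, stated in full; the proofs are below) =====
def Claim_equal_normalize_variant : Prop := ∀ (chrom : String) (pos : Int) (ref : String) (alt : String), Dom_normalize_variant chrom pos ref alt → Spec_normalize_variant chrom pos ref alt (normalize_variant chrom pos ref alt)

-- ===== LEMMAS AND PROOFS =====

theorem bCount_le_aux (cond : Nat → Bool) (lim : Nat) :
    ∀ n k, lim - k ≤ n → k ≤ lim → bCount cond lim k ≤ lim := by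
  intro n
  induction n with
  | zero =>
    intro k h hk
    rw [bCount]
    split_ifs with h1
    · exact absurd h1.1 (by omega)
    · exact hk
  | succ n ih =>
    intro k h hk
    rw [bCount]
    split_ifs with h1
    · exact ih (k + 1) (by omega) (by omega)
    · exact hk

theorem bCount_le (cond : Nat → Bool) (lim k : Nat) (hk : k ≤ lim) : bCount cond lim k ≤ lim :=
  bCount_le_aux cond lim (lim - k) k le_rfl hk

theorem bCount_congr_aux (cond cond' : Nat → Bool) (lim : Nat)
    (h : ∀ j, j < lim → cond j = cond' j) :
    ∀ n k, lim - k ≤ n → bCount cond lim k = bCount cond' lim k := by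
  intro n
  induction n with
  | zero =>
    intro k hf
    conv_lhs => rw [bCount]
    conv_rhs => rw [bCount]
    split_ifs with h1 h2 h3
    · exact absurd h1.1 (by omega)
    · exact absurd h1.1 (by omega)
    · exact absurd h3.1 (by omega)
    · rfl
  | succ n ih =>
    intro k hf
    conv_lhs => rw [bCount]
    conv_rhs => rw [bCount]
    split_ifs with h1 h2 h3
    · exact ih (k + 1) (by omega)
    · exact absurd ⟨h1.1, ((h k h1.1).symm).trans h1.2⟩ h2
    · exact absurd ⟨h3.1, (h k h3.1).trans h3.2⟩ h1
    · rfl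

theorem bCount_congr (cond cond' : Nat → Bool) (lim k : Nat)
    (h : ∀ j, j < lim → cond j = cond' j) : bCount cond lim k = bCount cond' lim k :=
  bCount_congr_aux cond cond' lim h (lim - k) k le_rfl

theorem bCount_shift_aux (cond cond' : Nat → Bool) (lim : Nat)
    (h : ∀ j, j < lim → cond' j = cond (j + 1)) :
    ∀ n k, lim - k ≤ n → bCount cond (lim + 1) (k + 1) = bCount cond' lim k + 1 := by
  intro n
  induction n with
  | zero =>
    intro k hf
    conv_lhs => rw [bCount]
    conv_rhs => rw [bCount]
    split_ifs with h1 h2 h3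
    · exact absurd h1.1 (by omega)
    · exact absurd h1.1 (by omega)
    · exact absurd h3.1 (by omega)
    · rfl
  | succ n ih =>
    intro k hf
    conv_lhs => rw [bCount]
    conv_rhs => rw [bCount]
    split_ifs with h1 h2 h3
    · exact ih (k + 1) (by omega)
    · exact absurd ⟨by omega, (h k (by omega)).trans h1.2⟩ h2
    · exact absurd ⟨by omega, ((h k h3.1).symm).trans h3.2⟩ h1
    · rfl

theorem bCount_shift (cond cond' : Nat → Bool) (lim : Nat)
    (h : ∀ j, j < lim → cond' j = cond (j + 1)) :
    bCount cond (lim + 1) 1 = bCount cond' lim 0 + 1 :=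
  bCount_shift_aux cond cond' lim h lim 0 (by omega)

-- B's suffix-count and prefix-count (exactly the bCount calls of the port of B)
def sufCnt (r a : List Char) : Nat :=
  bCount (fun k => decide (PySem.List.pyGet? r ((r.length : Int) - 1 - (k : Int)) = PySem.List.pyGet? a ((a.length : Int) - 1 - (k : Int)))) (min r.length a.length - 1) 0

def preCnt (r a : List Char) : Nat :=
  bCount (fun p => decide (PySem.List.pyGet? r (p : Int) = PySem.List.pyGet? a (p : Int))) (min r.length a.length - 1) 0

theorem sufCnt_le (r a : List Char) : sufCnt r a ≤ min r.length a.length - 1 :=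
  bCount_le _ _ 0 (Nat.zero_le _)

theorem preCnt_le (r a : List Char) : preCnt r a ≤ min r.length a.length - 1 :=
  bCount_le _ _ 0 (Nat.zero_le _)

theorem pyGet_pred (r : List Char) (h : 0 < r.length) :
    PySem.List.pyGet? r ((r.length : Int) - 1) = r.getLast? := by
  rw [PySem.List.pyGet?_of_nonneg r (by push_cast; omega), List.getLast?_eq_getElem?]
  congr 1
  omega

theorem sufCnt_step (r a : List Char) (h1 : 1 < r.length) (h2 : 1 < a.length)
    (h3 : PySem.List.pyGet? r (-1) = PySem.List.pyGet? a (-1)) :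
    sufCnt r a = sufCnt r.dropLast a.dropLast + 1 := by
  have hlast : r.getLast? = a.getLast? := by
    rw [← PySem.List.pyGet?_neg_one, ← PySem.List.pyGet?_neg_one]; exact h3
  unfold sufCnt
  have hlim : min r.length a.length - 1 = (min r.dropLast.length a.dropLast.length - 1) + 1 := by
    simp only [List.length_dropLast]; omega
  rw [hlim, bCount]
  split_ifs with h0
  · apply bCount_shift
    intro j hj
    have hjr : j < r.length - 2 := by simp only [List.length_dropLast] at hj; omega
    have hja : j < a.length - 2 := by simp only [List.length_dropLast] at hj; omega
    have er1 : PySem.List.pyGet? r.dropLast ((r.dropLast.length : Int) - 1 - (j : Int)) = r[r.length - 2 - j]? := by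
      rw [PySem.List.pyGet?_of_nonneg _ (by simp only [List.length_dropLast]; push_cast; omega)]
      have ht : (((r.dropLast.length : Int)) - 1 - (j : Int)).toNat = r.length - 2 - j := by
        simp only [List.length_dropLast]; omega
      rw [ht, List.getElem?_dropLast, if_pos (by omega)]
    have ea1 : PySem.List.pyGet? a.dropLast ((a.dropLast.length : Int) - 1 - (j : Int)) = a[a.length - 2 - j]? := by
      rw [PySem.List.pyGet?_of_nonneg _ (by simp only [List.length_dropLast]; push_cast; omega)]
      have ht : (((a.dropLast.length : Int)) - 1 - (j : Int)).toNat = a.length - 2 - j := by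
        simp only [List.length_dropLast]; omega
      rw [ht, List.getElem?_dropLast, if_pos (by omega)]
    have er2 : PySem.List.pyGet? r ((r.length : Int) - 1 - ((j + 1 : Nat) : Int)) = r[r.length - 2 - j]? := by
      rw [PySem.List.pyGet?_of_nonneg _ (by push_cast; omega)]
      congr 1
      push_cast
      omega
    have ea2 : PySem.List.pyGet? a ((a.length : Int) - 1 - ((j + 1 : Nat) : Int)) = a[a.length - 2 - j]? := by
      rw [PySem.List.pyGet?_of_nonneg _ (by push_cast; omega)]
      congr 1
      push_cast
      omega
    simp only [er1, ea1, er2, ea2]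
  · exfalso
    apply h0
    refine ⟨by omega, ?_⟩
    simp only [Nat.cast_zero, sub_zero, decide_eq_true_eq]
    rw [pyGet_pred r (by omega), pyGet_pred a (by omega)]
    exact hlast

theorem sufCnt_zero (r a : List Char)
    (h : ¬(1 < r.length ∧ 1 < a.length ∧ PySem.List.pyGet? r (-1) = PySem.List.pyGet? a (-1))) :
    sufCnt r a = 0 := by
  unfold sufCnt
  rw [bCount]
  split_ifs with h0
  · exfalso
    obtain ⟨hl, hc⟩ := h0
    have h1 : 1 < r.length := by omega
    have h2 : 1 < a.length := by omega
    simp only [Nat.cast_zero, sub_zero, decide_eq_true_eq] at hc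
    rw [pyGet_pred r (by omega), pyGet_pred a (by omega)] at hc
    exact h ⟨h1, h2, by rw [PySem.List.pyGet?_neg_one, PySem.List.pyGet?_neg_one]; exact hc⟩
  · rfl

theorem preCnt_step (r a : List Char) (h1 : 1 < r.length) (h2 : 1 < a.length)
    (h3 : PySem.List.pyGet? r 0 = PySem.List.pyGet? a 0) :
    preCnt r a = preCnt r.tail a.tail + 1 := by
  unfold preCnt
  have hlim : min r.length a.length - 1 = (min r.tail.length a.tail.length - 1) + 1 := by
    simp only [List.length_tail]; omega
  rw [hlim, bCount]
  split_ifs with h0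
  · apply bCount_shift
    intro j hj
    simp only [PySem.List.pyGet?_natCast, List.getElem?_tail]
  · exfalso
    apply h0
    refine ⟨by omega, ?_⟩
    simp only [Nat.cast_zero, decide_eq_true_eq]
    exact h3

theorem preCnt_zero (r a : List Char)
    (h : ¬(1 < r.length ∧ 1 < a.length ∧ PySem.List.pyGet? r 0 = PySem.List.pyGet? a 0)) :
    preCnt r a = 0 := by
  unfold preCnt
  rw [bCount]
  split_ifs with h0
  · exfalso
    obtain ⟨hl, hc⟩ := h0
    simp only [Nat.cast_zero, decide_eq_true_eq] at hc
    exact h ⟨by omega, by omega, hc⟩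
  · rfl

theorem trimSufA_eq (r a : List Char) :
    trimSufA r a = (r.take (r.length - sufCnt r a), a.take (a.length - sufCnt r a)) := by
  by_cases h : 1 < r.length ∧ 1 < a.length ∧ PySem.List.pyGet? r (-1) = PySem.List.pyGet? a (-1)
  · obtain ⟨h1, h2, h3⟩ := h
    have ih := trimSufA_eq r.dropLast a.dropLast
    rw [trimSufA, if_pos ⟨h1, h2, h3⟩, PySem.List.slice_to_neg_one, PySem.List.slice_to_neg_one,
        ih, sufCnt_step r a h1 h2 h3]
    have er : r.dropLast.take (r.dropLast.length - sufCnt r.dropLast a.dropLast)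
        = r.take (r.length - (sufCnt r.dropLast a.dropLast + 1)) := by
      simp only [List.length_dropLast]
      rw [List.dropLast_eq_take (l := r), List.take_take]
      congr 1
      omega
    have ea : a.dropLast.take (a.dropLast.length - sufCnt r.dropLast a.dropLast)
        = a.take (a.length - (sufCnt r.dropLast a.dropLast + 1)) := by
      simp only [List.length_dropLast]
      rw [List.dropLast_eq_take (l := a), List.take_take]
      congr 1
      omega
    exact Prod.ext er ea
  · rw [trimSufA, if_neg h, sufCnt_zero r a h]
    simp
termination_by r.length
decreasing_by simp only [List.length_dropLast]; omega

theorem drop_tail' (l : List Char) (n : Nat) : l.tail.drop n = l.drop (n + 1) := by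
  rw [← List.drop_one, List.drop_drop, Nat.add_comm]

theorem trimPreA_eq (pos : Int) (r a : List Char) :
    trimPreA pos r a = (pos + (preCnt r a : Int), r.drop (preCnt r a), a.drop (preCnt r a)) := by
  by_cases h : 1 < r.length ∧ 1 < a.length ∧ PySem.List.pyGet? r 0 = PySem.List.pyGet? a 0
  · obtain ⟨h1, h2, h3⟩ := h
    have ih := trimPreA_eq (pos + 1) r.tail a.tail
    rw [trimPreA, if_pos ⟨h1, h2, h3⟩, PySem.List.slice_from_one, PySem.List.slice_from_one,
        ih, preCnt_step r a h1 h2 h3]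
    refine Prod.ext ?_ (Prod.ext ?_ ?_)
    · push_cast; ring
    · exact drop_tail' r (preCnt r.tail a.tail)
    · exact drop_tail' a (preCnt r.tail a.tail)
  · rw [trimPreA, if_neg h, preCnt_zero r a h]
    simp
termination_by r.length
decreasing_by simp only [List.length_tail]; omega

-- ===== VERDICT (by name: the statement is the Claim_ definition above) =====
theorem normalize_variant_spec : Claim_equal_normalize_variant := by
  intro chrom pos ref alt _hdom
  unfold Spec_normalize_variant normalize_variant normalize_variant_alt
  by_cases h1 : (PySem.Str.startswith alt "<" || PySem.Str.startswith ref "<") = true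
  · rw [if_pos h1, if_pos (by simp only [Bool.or_eq_true] at h1 ⊢; tauto)]
  · by_cases h2 : (ref.toList.isEmpty || alt.toList.isEmpty) = true
    · rw [if_neg h1, if_pos h2,
        if_pos (by simp only [Bool.or_eq_true] at h1 h2 ⊢; tauto)]
    · have hB : ¬ (PySem.Str.startswith alt "<" || PySem.Str.startswith ref "<" || ref.toList.isEmpty || alt.toList.isEmpty) = true := by
        simp only [Bool.or_eq_true] at h1 h2 ⊢; tauto
      rw [if_neg h1, if_neg h2, if_neg hB]
      simp only [Bool.or_eq_true, not_or, Bool.not_eq_true, List.isEmpty_eq_false_iff] at h2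
      obtain ⟨hrne, hane⟩ := h2
      have hrl : 0 < ref.toList.length := List.length_pos_iff.mpr hrne
      have hal : 0 < alt.toList.length := List.length_pos_iff.mpr hane
      dsimp only
      rw [trimSufA_eq]
      dsimp only
      rw [trimPreA_eq]
      dsimp only
      have hk := sufCnt_le ref.toList alt.toList
      have hl1 : (ref.toList.take (ref.toList.length - sufCnt ref.toList alt.toList)).length
          = ref.toList.length - sufCnt ref.toList alt.toList := by
        rw [List.length_take]; omega
      have hl2 : (alt.toList.take (alt.toList.length - sufCnt ref.toList alt.toList)).length
          = alt.toList.length - sufCnt ref.toList alt.toList := by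
        rw [List.length_take]; omega
      have hp := preCnt_le (ref.toList.take (ref.toList.length - sufCnt ref.toList alt.toList))
        (alt.toList.take (alt.toList.length - sufCnt ref.toList alt.toList))
      rw [hl1, hl2] at hp
      -- the prefix count over the suffix-trimmed alleles equals B's prefix count over the originals
      have hpeq : preCnt (ref.toList.take (ref.toList.length - sufCnt ref.toList alt.toList))
            (alt.toList.take (alt.toList.length - sufCnt ref.toList alt.toList))
          = bCount (fun p => decide (PySem.List.pyGet? ref.toList (p : Int) = PySem.List.pyGet? alt.toList (p : Int)))
              (min ref.toList.length alt.toList.length - sufCnt ref.toList alt.toList - 1) 0 := by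
        unfold preCnt
        rw [hl1, hl2]
        have hmm : min (ref.toList.length - sufCnt ref.toList alt.toList)
            (alt.toList.length - sufCnt ref.toList alt.toList) - 1
            = min ref.toList.length alt.toList.length - sufCnt ref.toList alt.toList - 1 := by omega
        rw [hmm]
        apply bCount_congr
        intro j hj
        have hjr : j < ref.toList.length - sufCnt ref.toList alt.toList := by omega
        have hja : j < alt.toList.length - sufCnt ref.toList alt.toList := by omega
        simp only [PySem.List.pyGet?_natCast, List.getElem?_take, hjr, hja, if_true]
      -- the final '.'-branch of A is never taken: both trimmed alleles stay nonempty
      have hlr2 : 0 < ((ref.toList.take (ref.toList.length - sufCnt ref.toList alt.toList)).drop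
          (preCnt (ref.toList.take (ref.toList.length - sufCnt ref.toList alt.toList))
            (alt.toList.take (alt.toList.length - sufCnt ref.toList alt.toList)))).length := by
        rw [List.length_drop, hl1]; omega
      have hla2 : 0 < ((alt.toList.take (alt.toList.length - sufCnt ref.toList alt.toList)).drop
          (preCnt (ref.toList.take (ref.toList.length - sufCnt ref.toList alt.toList))
            (alt.toList.take (alt.toList.length - sufCnt ref.toList alt.toList)))).length := by
        rw [List.length_drop, hl2]; omega
      rw [if_neg (by
        simp only [Bool.or_eq_true, List.isEmpty_iff, not_or]
        exact ⟨List.ne_nil_of_length_pos hlr2, List.ne_nil_of_length_pos hla2⟩)]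
      rw [hpeq]
      unfold sufCnt
      rw [PySem.List.slice_natCast, PySem.List.slice_natCast]
      refine Prod.ext rfl (Prod.ext ?_ ?_)
      · show String.ofList _ = String.ofList _
        congr 1
        rw [List.drop_take]
      · show String.ofList _ = String.ofList _
        congr 1
        rw [List.drop_take]
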